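-- pv_equiv track=rewrite | github.com/DylanJoo/temp | treccast/create_conv_qa.py | combine_utterance_response
-- ===== SOURCE A (Python) =====
-- def combine_utterance_response(utterances, responses, current_i):
--     '''Indicate the i-th turn would consist i-1, i-2, i-3'''
--     output = list()
--     for i, (u, r) in enumerate(zip(utterances[:-1], responses[:-1])):
--         if i >= (current_i - 1):
--             output.append(u)
--             output.append(r)
--         else:
--             output.append(u)
--     output.append(utterances[-1])
--
--     return " ||| ".join(output)
-- ===== SOURCE B (Python) =====
-- def combine_utterance_response(utterances, responses, current_i):
--     '''Indicate the i-th turn would consist i-1, i-2, i-3'''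
--     m = max(min(len(utterances), len(responses)) - 1, 0)
--     k = min(max(current_i - 1, 0), m)
--     interleaved = [x for pair in zip(utterances[k:m], responses[k:m]) for x in pair]
--     return " ||| ".join(utterances[:k] + interleaved + [utterances[-1]])
-- ===== Notes on version B (the rewrite author's own statement) =====
-- stated objective: simpler
-- what changed: Replaces A's enumerate loop with a per-element branch by computing the clamped threshold k once and concatenating three slices: the utterances-only prefix utterances[:k], the flattened zip(utterances[k:m], responses[k:m]) interleaving, and the final utterance.
import Mathlib
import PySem

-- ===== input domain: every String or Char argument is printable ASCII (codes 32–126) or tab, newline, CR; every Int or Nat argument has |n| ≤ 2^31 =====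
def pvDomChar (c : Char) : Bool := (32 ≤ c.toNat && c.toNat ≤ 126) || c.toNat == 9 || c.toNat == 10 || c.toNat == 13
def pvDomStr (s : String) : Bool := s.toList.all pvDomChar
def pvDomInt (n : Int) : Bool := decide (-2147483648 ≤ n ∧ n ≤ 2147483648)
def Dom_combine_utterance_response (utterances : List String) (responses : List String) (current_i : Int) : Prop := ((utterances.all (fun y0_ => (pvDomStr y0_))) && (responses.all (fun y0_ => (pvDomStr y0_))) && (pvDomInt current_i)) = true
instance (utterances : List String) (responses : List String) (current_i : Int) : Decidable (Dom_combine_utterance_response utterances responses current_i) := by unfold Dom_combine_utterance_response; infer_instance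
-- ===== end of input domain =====

-- B replaces A's per-element branch inside the loop by structural slicing: a plain-utterance
-- prefix, an interleaved zip suffix, and the final utterance (objective: simpler decomposition).

-- ===== PORT A =====
-- literal transliteration of A: output = []; for i,(u,r) in enumerate(zip(us[:-1], rs[:-1])):
-- append u (and r when i >= current_i-1); append us[-1]; join " ||| ".
def combine_utterance_response (utterances : List String) (responses : List String) (current_i : Int) : String :=
  let pairs := (PySem.List.slice utterances none (some (-1))).zip (PySem.List.slice responses none (some (-1)))
  let output : List String :=
    (PySem.List.enumerate pairs 0).foldl
      (fun acc ir => if ir.1 ≥ current_i - 1 then acc ++ [ir.2.1, ir.2.2] else acc ++ [ir.2.1]) []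
  -- utterances[-1] raises IndexError on []; Pre_ excludes that, "" is never used inside Pre_
  let output := output ++ [(PySem.List.pyGet? utterances (-1)).getD ""]
  PySem.Str.join " ||| " output

-- ===== PORT B =====
-- literal transliteration of B: m, k clamps; prefix us[:k]; flatten zip(us[k:m], rs[k:m]); us[-1].
def combine_utterance_response_alt (utterances : List String) (responses : List String) (current_i : Int) : String :=
  let m : Int := max (min (PySem.List.len utterances) (PySem.List.len responses) - 1) 0
  let k : Int := min (max (current_i - 1) 0) m
  let interleaved : List String :=
    ((PySem.List.slice utterances (some k) (some m)).zip (PySem.List.slice responses (some k) (some m))).flatMap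
      (fun p => [p.1, p.2])
  PySem.Str.join " ||| "
    (PySem.List.slice utterances none (some k) ++ interleaved ++ [(PySem.List.pyGet? utterances (-1)).getD ""])

-- ===== PRECONDITION & SPEC =====
-- Pre_ excludes only empty `utterances`, where A (and B alike) raises IndexError on utterances[-1].
def Pre_combine_utterance_response (utterances : List String) (responses : List String) (current_i : Int) : Prop :=
  utterances ≠ []
instance (utterances : List String) (responses : List String) (current_i : Int) : Decidable (Pre_combine_utterance_response utterances responses current_i) := by unfold Pre_combine_utterance_response; infer_instance

def pvWitness_combine_utterance_response : List String × List String × Int := (["hi", "there", "bye"], ["r1", "r2"], 2)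

def Spec_combine_utterance_response (utterances : List String) (responses : List String) (current_i : Int) (out : String) : Prop := out = combine_utterance_response_alt utterances responses current_i
instance (utterances : List String) (responses : List String) (current_i : Int) (out : String) : Decidable (Spec_combine_utterance_response utterances responses current_i out) := by unfold Spec_combine_utterance_response; infer_instance

-- ===== CLAIM (what is proved, stated in full; the proofs are below) =====
def Claim_equal_combine_utterance_response : Prop := ∀ (utterances : List String) (responses : List String) (current_i : Int), Dom_combine_utterance_response utterances responses current_i → Pre_combine_utterance_response utterances responses current_i → Spec_combine_utterance_response utterances responses current_i (combine_utterance_response utterances responses current_i)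

-- ===== LEMMAS AND PROOFS =====

-- A's loop in closed form: utterances-only prefix up to threshold t-s, interleaved pairs after.
lemma fold_interleave (zs : List (String × String)) (t s : Int) (acc : List String) :
    (PySem.List.enumerate zs s).foldl
      (fun acc ir => if ir.1 ≥ t then acc ++ [ir.2.1, ir.2.2] else acc ++ [ir.2.1]) acc
  = acc ++ (zs.take (t - s).toNat).map Prod.fst
        ++ (zs.drop (t - s).toNat).flatMap (fun p => [p.1, p.2]) := by
  induction zs generalizing s acc with
  | nil => simp [PySem.List.enumerate]
  | cons z zs ih =>
    rw [PySem.List.enumerate_cons]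
    simp only [List.foldl_cons]
    by_cases h : s ≥ t
    · have h0 : (t - s).toNat = 0 := by omega
      have h1 : (t - (s + 1)).toNat = 0 := by omega
      rw [ih, h1]
      simp [h0, h]
    · have hn : (t - s).toNat = (t - (s + 1)).toNat + 1 := by omega
      rw [ih, hn]
      simp [h]

lemma zip_take_take {α β : Type} (as : List α) (bs : List β) (p q : Nat) :
    (as.take p).zip (bs.take q) = (as.zip bs).take (min p q) := by
  induction as generalizing bs p q with
  | nil => simp
  | cons a as ih =>
    cases bs with
    | nil => simp
    | cons b bs =>
      cases p with
      | zero => simp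
      | succ p =>
        cases q with
        | zero => simp
        | succ q =>
          simp only [List.take_succ_cons, List.zip_cons_cons, Nat.succ_min_succ, ih]

lemma zip_drop_drop {α β : Type} (as : List α) (bs : List β) (a : Nat) :
    (as.drop a).zip (bs.drop a) = (as.zip bs).drop a := by
  induction as generalizing bs a with
  | nil => simp
  | cons x as ih =>
    cases bs with
    | nil => simp
    | cons y bs =>
      cases a with
      | zero => simp
      | succ a => simpa using ih bs a

lemma map_fst_zip_take {α β : Type} (as : List α) (bs : List β) :
    (as.zip bs).map Prod.fst = as.take (min as.length bs.length) := by
  rw [List.zip_eq_zip_take_min, List.map_fst_zip (by simp)]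

-- ===== VERDICT (by name: the statement is the Claim_ definition above) =====
theorem combine_utterance_response_spec : Claim_equal_combine_utterance_response := by
  intro us rs ci _ hpre
  unfold Spec_combine_utterance_response
  unfold combine_utterance_response combine_utterance_response_alt
  dsimp only
  have hlu : 1 ≤ us.length := by
    cases us with
    | nil => exact absurd rfl hpre
    | cons a l => simp
  rw [PySem.List.len_eq us, PySem.List.len_eq rs]
  set m : Int := max (min ((us.length : Int)) ((rs.length : Int)) - 1) 0 with hm
  set k : Int := min (max (ci - 1) 0) m with hk
  set L : Nat := min (us.length - 1) (rs.length - 1) with hL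
  set n : Nat := (ci - 1).toNat with hn
  have hm0 : 0 ≤ m := by omega
  have hk0 : 0 ≤ k := by omega
  have hmL : m.toNat = L := by omega
  have hkn : k.toNat = min n L := by omega
  rw [PySem.List.slice_to_neg_one, PySem.List.slice_to_neg_one,
      PySem.List.slice_to us hk0,
      PySem.List.slice_toNat us hk0 hm0, PySem.List.slice_toNat rs hk0 hm0,
      fold_interleave]
  simp only [Int.sub_zero, ← hn, List.nil_append]
  have hzs : us.dropLast.zip rs.dropLast = (us.zip rs).take L := by
    rw [List.dropLast_eq_take, List.dropLast_eq_take, zip_take_take, hL]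
  have hmid : (us.dropLast.zip rs.dropLast).drop n
      = ((us.drop k.toNat).take (m.toNat - k.toNat)).zip ((rs.drop k.toNat).take (m.toNat - k.toNat)) := by
    rw [hzs, List.drop_take, zip_take_take, zip_drop_drop, hkn, hmL, Nat.min_self]
    by_cases hc : n ≤ L
    · rw [Nat.min_eq_left hc]
    · have h1 : L - n = 0 := by omega
      have h2 : L - min n L = 0 := by omega
      rw [h1, h2, List.take_zero, List.take_zero]
  have hpref : ((us.dropLast.zip rs.dropLast).take n).map Prod.fst = us.take k.toNat := by
    rw [hzs, List.take_take, List.map_take, map_fst_zip_take, List.take_take, hkn]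
    congr 1
    omega
  rw [hmid, hpref]
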